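-- pv_equiv track=rewrite | github.com/andrinM/agat | algorithms/randomness/occurance_ranking.py | preprocess_constraints
-- ===== SOURCE A (Python) =====
-- def preprocess_constraints(ml, cl, n):
--     "Create a graph of constraints for both must- and cannot-links"
--
--     """ Represent the graphs using adjacency-lists. This creates two empty dictionaries of size n
--     and with keys from 0 to n. Each key is associated with an empty set.
--     Keyword arguments:
--     ml -- list of must-links
--     cl-- list of cannot-links
--     n -- number of rows (data points)
--     """
--     ml_graph, cl_graph = {}, {}
--     for i in range(n):
--         ml_graph[i] = set()
--         cl_graph[i] = set()
--
--     def add_both(d, i, j):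
--         d[i].add(j)
--         d[j].add(i)
--
--     """ Key of dict acts as index of a data point. The set (value) represent the neighboors
--     of the index. Example:
--     ml = [(1,2),(2,4)]
--     ml_graph = {0:set(), 1:{2}, 2:{1,4}, 3:set(), 4:{2}}
--     returns adjacency list
--     """
--     for (i, j) in ml:
--         ml_graph[i].add(j)
--         ml_graph[j].add(i)
--
--     for (i, j) in cl:
--         cl_graph[i].add(j)
--         cl_graph[j].add(i)
--
--     def dfs(i, graph, visited, component): # Depth First Search Algorithm
--         visited[i] = True
--         for j in graph[i]:
--             if not visited[j]:
--                 dfs(j, graph, visited, component)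
--         component.append(i)
--
--     """ Keyword arguments:
--     component -- list of connected nodes (data points)
--     neighborhoods -- list of lists. Each within list is a component
--     """
--     # Run DFS from each node to get all the graph's components
--     # and add an edge for each pair of nodes in the component (create a complete graph)
--     # See http://www.techiedelight.com/transitive-closure-graph/ for more details
--     visited = [False] * n
--     neighborhoods = []
--     for i in range(n): # traverse each data point (node)
--         if not visited[i] and ml_graph[i]: # If ml_graph[i] has values then we get true otherwise false
--             component = []
--             dfs(i, ml_graph, visited, component)
--             for x1 in component:
--                 for x2 in component:
--                     if x1 != x2:
--                         ml_graph[x1].add(x2)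
--             neighborhoods.append(component) # neighborhoods is a list of lists. Each within list is a component
--
--     """ This for loop adds nodes (data points) to the cl_graph if they have a transitive
--     inference of a cannot-link constrans. It basically adds some of the must-links to the
--     cl_graph, if they violate consistency
--     """
--     for (i, j) in cl:
--         for x in ml_graph[i]: # i is the key of ml_graph and x is the corresponding value
--             add_both(cl_graph, x, j)
--
--         for y in ml_graph[j]:
--             add_both(cl_graph, i, y)
--
--         for x in ml_graph[i]:
--             for y in ml_graph[j]:
--                 add_both(cl_graph, x, y)
--
--     """ This for loop checks if any tuple is a must-link AND a cannot-link constraint.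
--     If this is the case, an exception gets thrown.
--     """
--     for i in ml_graph: # iterate over the keys
--         for j in ml_graph[i]:
--             if j != i and j in cl_graph[i]:
--                 raise ValueError('Inconsistent constraints between {} and {}'.format(i, j))
--
--     return ml_graph, cl_graph, neighborhoods
-- ===== SOURCE B (Python) =====
-- def preprocess_constraints(ml, cl, n):
--     "Create a graph of constraints for both must- and cannot-links"
--     # One-pass partner index first (lists), turned into the adjacency sets in one
--     # comprehension; components found with an explicit-stack iterative DFS that
--     # emits the same post-order as a recursive one.
--     partners = {i: [] for i in range(n)}
--     for (i, j) in ml: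
--         partners[i].append(j)
--         partners[j].append(i)
--     ml_graph = {i: set(partners[i]) for i in range(n)}
--
--     cpartners = {i: [] for i in range(n)}
--     for (i, j) in cl:
--         cpartners[i].append(j)
--         cpartners[j].append(i)
--     cl_graph = {i: set(cpartners[i]) for i in range(n)}
--
--     visited = [False] * n
--     neighborhoods = []
--     for i in range(n):
--         if not visited[i] and ml_graph[i]:
--             visited[i] = True
--             component = []
--             stack = [(i, iter(ml_graph[i]))]
--             while stack:
--                 node, it = stack[-1]
--                 j = next(it, None)
--                 if j is None:
--                     component.append(node)
--                     stack.pop()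
--                 elif not visited[j]:
--                     visited[j] = True
--                     stack.append((j, iter(ml_graph[j])))
--             for x in component:
--                 ml_graph[x].update(y for y in component if y != x)
--             neighborhoods.append(component)
--
--     def _add_both(d, a, b):
--         d[a].add(b)
--         d[b].add(a)
--
--     for (i, j) in cl:
--         for x in ml_graph[i]:
--             _add_both(cl_graph, x, j)
--         for y in ml_graph[j]:
--             _add_both(cl_graph, i, y)
--         for x in ml_graph[i]:
--             for y in ml_graph[j]:
--                 _add_both(cl_graph, x, y)
--
--     for i in ml_graph:
--         for j in ml_graph[i]:
--             if j != i and j in cl_graph[i]: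
--                 raise ValueError('Inconsistent constraints between {} and {}'.format(i, j))
--
--     return ml_graph, cl_graph, neighborhoods
-- ===== Notes on version B (the rewrite author's own statement) =====
-- stated objective: alternative
-- what changed: B builds the adjacency sets from a one-pass per-node partner index (lists appended in one sweep over the links, then turned into sets) instead of per-edge dict-of-set mutation, and finds each component with an explicit-stack iterative DFS (frames of node + remaining-neighbour iterator) that emits the same post-order as A's recursive dfs; clique completion is a per-node batch update, propagation and the consistency check are unchanged.
import Mathlib
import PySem

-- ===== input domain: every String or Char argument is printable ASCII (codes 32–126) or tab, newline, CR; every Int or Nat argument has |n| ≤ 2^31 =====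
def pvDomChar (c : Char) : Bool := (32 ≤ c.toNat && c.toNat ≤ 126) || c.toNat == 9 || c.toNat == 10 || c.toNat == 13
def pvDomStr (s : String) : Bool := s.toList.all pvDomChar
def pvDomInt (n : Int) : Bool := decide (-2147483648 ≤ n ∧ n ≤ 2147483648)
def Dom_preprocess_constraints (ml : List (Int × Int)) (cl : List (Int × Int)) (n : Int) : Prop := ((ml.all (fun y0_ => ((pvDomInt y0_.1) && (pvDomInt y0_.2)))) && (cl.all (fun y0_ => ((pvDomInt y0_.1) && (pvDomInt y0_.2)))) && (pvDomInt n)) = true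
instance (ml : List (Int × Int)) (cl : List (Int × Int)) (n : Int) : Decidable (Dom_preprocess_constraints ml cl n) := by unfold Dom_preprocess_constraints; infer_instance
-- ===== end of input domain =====

-- B replaces the recursive dfs by an explicit-stack iterative DFS emitting the same post-order and
-- builds the adjacency sets from a one-pass partner index instead of per-edge dict mutation
-- (objective: alternative decomposition, same cost). A mutates its dict arguments only internally;
-- the equivalence is about the return value. The returned neighborhoods list is sensitive to the
-- iteration order of CPython's int sets, so both ports share an exact model of that order (PySet:
-- open addressing, table of 8 growing 4x at 3/5 fill, hash(v) = v, linear probes then perturbation —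
-- checked against CPython); dict values declared set[int] are compared as finite sets by the harness.

-- ===== PORT A =====
-- exact model of a CPython set of (nonnegative, in-range under Pre_) ints: insertion into an open
-- hash table; toList (= iteration order) is table-slot order, as in CPython.
structure PySet where
  table : List (Option Int)
  used : Nat
deriving Repr, DecidableEq

def psEmpty : PySet := ⟨List.replicate 8 none, 0⟩

-- probe the k+1 consecutive slots i..i+k (CPython's LINEAR_PROBES): free slot / already present / all busy
def psScan (tbl : List (Option Int)) (v : Int) : Nat → Nat → Option (Option Nat)
  | i, 0 =>
    match tbl.getD i none with
    | none => some (some i)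
    | some w => if w = v then some none else none
  | i, k+1 =>
    match tbl.getD i none with
    | none => some (some i)
    | some w => if w = v then some none else psScan tbl v (i+1) k

-- CPython's probe sequence: i = (i*5 + 1 + perturb) & mask, perturb >>= 5; the fuel is generous
-- (a free slot is always found long before tbl.length + 70 rounds; fuel 0 is never reached)
def psLoop (tbl : List (Option Int)) (mask : Nat) (v : Int) : Nat → Nat → Nat → Option Nat
  | 0, _, _ => none
  | f+1, i, p =>
    match psScan tbl v i (if i + 9 ≤ mask then 9 else 0) with
    | some (some slot) => some slot
    | some none => none
    | none => psLoop tbl mask v f ((i*5 + 1 + (p >>> 5)) &&& mask) (p >>> 5)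

def psRawInsert (tbl : List (Option Int)) (v : Int) : List (Option Int) :=
  match psLoop tbl (tbl.length - 1) v (tbl.length + 70) (v.toNat &&& (tbl.length - 1)) v.toNat with
  | some slot => tbl.set slot (some v)
  | none => tbl

def growFuel : Nat → Nat → Nat → Nat
  | 0, ns, _ => ns
  | f+1, ns, minused => if ns ≤ minused then growFuel f (ns*2) minused else ns

def psResize (tbl : List (Option Int)) (used : Nat) : PySet :=
  let minused := if used > 50000 then used*2 else used*4
  let ns := growFuel (minused+8) 8 minused
  ⟨(tbl.filterMap id).foldl psRawInsert (List.replicate ns none), used⟩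

def psAdd (s : PySet) (v : Int) : PySet :=
  match psLoop s.table (s.table.length - 1) v (s.table.length + 70) (v.toNat &&& (s.table.length - 1)) v.toNat with
  | none => s
  | some slot =>
    let tbl := s.table.set slot (some v)
    let used := s.used + 1
    if used*5 ≥ (s.table.length - 1)*3 then psResize tbl used else ⟨tbl, used⟩

def PySet.toList (s : PySet) : List Int := s.table.filterMap id

-- d[i].add(j); d[j].add(i)  (keys exist under Pre_, so modify updates in place)
def addBoth2 (d : PySem.Dict Int PySet) (p : Int × Int) : PySem.Dict Int PySet :=
  (d.modify p.1 psEmpty (fun s => psAdd s p.2)).modify p.2 psEmpty (fun s => psAdd s p.1)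

-- Python's add_both(d, a, b) for the cannot-link graph (same helper in Source A and Source B)
def addBothCl (cg : PySem.Dict Int PySet) (a b : Int) : PySem.Dict Int PySet :=
  (cg.modify a psEmpty (fun s => psAdd s b)).modify b psEmpty (fun s => psAdd s a)

-- {i: set() for i in range(n)} resp. {i: [] for i in range(n)}
def initDict {V : Type} (keys : List Int) (c : V) : PySem.Dict Int V :=
  keys.foldl (fun d i => d.insert i c) PySem.Dict.empty

-- A's recursive dfs. Fuel counts allowed recursion DEPTH; each nested call marks a fresh node, so
-- the port's fuel n+1 is never exhausted on the inputs the driver produces (visited has length n).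
mutual
def dfsA (g : PySem.Dict Int PySet) : Nat → Int → List Bool → List Int → List Bool × List Int
  | 0, i, vis, comp => (vis, comp ++ [i])
  | f+1, i, vis, comp =>
    let vis1 := PySem.List.pySetD vis i true
    let r := dfsLA g f ((g.getD i psEmpty).toList) vis1 comp
    (r.1, r.2 ++ [i])
  termination_by f _ _ _ => (f, 0, 0)
def dfsLA (g : PySem.Dict Int PySet) : Nat → List Int → List Bool → List Int → List Bool × List Int
  | _, [], vis, comp => (vis, comp)
  | f, j :: js, vis, comp =>
    if PySem.List.pyGetD vis j true then dfsLA g f js vis comp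
    else
      let r := dfsA g f j vis comp
      dfsLA g f js r.1 r.2
  termination_by f js _ _ => (f, 1, js.length)
end

-- complete the found component into a clique: for x1 in component: for x2 in component: if x1 != x2: add
def completeA (g : PySem.Dict Int PySet) (comp : List Int) : PySem.Dict Int PySet :=
  comp.foldl (fun g x1 =>
    comp.foldl (fun g x2 => if x1 ≠ x2 then g.modify x1 psEmpty (fun s => psAdd s x2) else g) g) g

def stepA (fuel : Nat) (st : PySem.Dict Int PySet × List Bool × List (List Int)) (i : Int) :
    PySem.Dict Int PySet × List Bool × List (List Int) :=
  if !(PySem.List.pyGetD st.2.1 i true) && !((st.1.getD i psEmpty).toList.isEmpty) then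
    let r := dfsA st.1 fuel i st.2.1 []
    (completeA st.1 r.2, r.1, st.2.2 ++ [r.2])
  else st

-- the cannot-link propagation for one pair (i, j) of cl (same code in Source A and Source B)
def propStep (mlg : PySem.Dict Int PySet) (cg : PySem.Dict Int PySet) (p : Int × Int) :
    PySem.Dict Int PySet :=
  let cg1 := (mlg.getD p.1 psEmpty).toList.foldl (fun cg x => addBothCl cg x p.2) cg
  let cg2 := (mlg.getD p.2 psEmpty).toList.foldl (fun cg y => addBothCl cg p.1 y) cg1
  (mlg.getD p.1 psEmpty).toList.foldl
    (fun cg x => (mlg.getD p.2 psEmpty).toList.foldl (fun cg y => addBothCl cg x y) cg) cg2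

-- final consistency scan and return (same code in Source A and Source B); where Python raises ValueError
-- (bad = true) the input is outside Pre_ and the port returns a stub
def finalize (mlg cg : PySem.Dict Int PySet) (nb : List (List Int)) :
    (List (Int × List Int)) × (List (Int × List Int)) × List (List Int) :=
  let bad := mlg.items.any (fun kv => kv.2.toList.any (fun j => (j != kv.1) && ((cg.getD kv.1 psEmpty).toList.contains j)))
  if bad then ([], [], [])
  else (mlg.items.map (fun kv => (kv.1, kv.2.toList)), cg.items.map (fun kv => (kv.1, kv.2.toList)), nb)

def preprocess_constraints (ml : List (Int × Int)) (cl : List (Int × Int)) (n : Int) : (List (Int × List Int)) × (List (Int × List Int)) × List (List Int) :=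
  let keys := PySem.List.pyRange 0 n 1
  let mlg := ml.foldl addBoth2 (initDict keys psEmpty)
  let clg := cl.foldl addBoth2 (initDict keys psEmpty)
  let st := keys.foldl (stepA (n.toNat + 1)) (mlg, List.replicate n.toNat false, ([] : List (List Int)))
  let clg2 := cl.foldl (propStep st.1) clg
  finalize st.1 clg2 st.2.2

-- ===== PORT B =====
def psOfList (l : List Int) : PySet := l.foldl psAdd psEmpty

-- parts[i].append(j); parts[j].append(i) — B's one-pass partner index
def addBothL (d : PySem.Dict Int (List Int)) (p : Int × Int) : PySem.Dict Int (List Int) :=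
  (d.modify p.1 [] (· ++ [p.2])).modify p.2 [] (· ++ [p.1])

-- marking an unvisited slot strictly shrinks the number of false entries (termination of runB)
theorem aux_countP_set (vis : List Bool) (k : Nat) (h : vis[k]? = some false) :
    (vis.set k true).countP (fun b => !b) < vis.countP (fun b => !b) := by
  induction vis generalizing k with
  | nil => simp at h
  | cons b t ih =>
    cases k with
    | zero =>
      simp at h; subst h
      simp
    | succ k =>
      simp at h
      have := ih k h
      simp [List.countP_cons]
      omega

theorem countP_false_pySetD_lt (vis : List Bool) (j : Int)
    (h : PySem.List.pyGetD vis j true = false) :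
    (PySem.List.pySetD vis j true).countP (fun b => !b) < vis.countP (fun b => !b) := by
  simp only [PySem.List.pyGetD, PySem.List.pyGet?, PySem.List.pySetD, PySem.List.pySet?] at *
  rcases hi : PySem.List.pyIdx? vis.length j with _ | k
  · rw [hi] at h; simp at h
  · rw [hi] at h
    simp only [Option.bind_some, Option.map_some, Option.getD_some] at *
    rcases hk : vis[k]? with _ | b
    · rw [hk] at h; simp at h
    · rw [hk] at h; simp at h; subst h
      exact aux_countP_set vis k hk


-- B's explicit-stack DFS: frames (node, not-yet-scanned neighbours); a node is emitted to the
-- component (post-order) when its frame is exhausted; neighbours are marked when pushed.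
def runB (g : PySem.Dict Int PySet) : List (Int × List Int) → List Bool → List Int → List Bool × List Int
  | [], vis, comp => (vis, comp)
  | (node, []) :: S, vis, comp => runB g S vis (comp ++ [node])
  | (node, j :: js) :: S, vis, comp =>
    if PySem.List.pyGetD vis j true then runB g ((node, js) :: S) vis comp
    else runB g ((j, (g.getD j psEmpty).toList) :: (node, js) :: S) (PySem.List.pySetD vis j true) comp
termination_by S vis _ => (vis.countP (fun b => !b), (S.map (fun p => p.2.length)).sum + S.length)
decreasing_by
  · simp_wf; omega
  · simp_wf; omega
  · simp_wf
    rename_i h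
    rw [Bool.not_eq_true] at h
    exact Prod.Lex.left _ _ (countP_false_pySetD_lt _ _ h)

-- ml_graph[x].update(y for y in component if y != x)
def completeB (g : PySem.Dict Int PySet) (comp : List Int) : PySem.Dict Int PySet :=
  comp.foldl (fun g x => g.modify x psEmpty (fun s => (comp.filter (fun y => y != x)).foldl psAdd s)) g

def stepB (st : PySem.Dict Int PySet × List Bool × List (List Int)) (i : Int) :
    PySem.Dict Int PySet × List Bool × List (List Int) :=
  if !(PySem.List.pyGetD st.2.1 i true) && !((st.1.getD i psEmpty).toList.isEmpty) then
    let r := runB st.1 [(i, (st.1.getD i psEmpty).toList)] (PySem.List.pySetD st.2.1 i true) []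
    (completeB st.1 r.2, r.1, st.2.2 ++ [r.2])
  else st

def preprocess_constraints_alt (ml : List (Int × Int)) (cl : List (Int × Int)) (n : Int) : (List (Int × List Int)) × (List (Int × List Int)) × List (List Int) :=
  let keys := PySem.List.pyRange 0 n 1
  let parts := ml.foldl addBothL (initDict keys ([] : List Int))
  let mlg := keys.foldl (fun d i => d.insert i (psOfList (parts.getD i []))) PySem.Dict.empty
  let cparts := cl.foldl addBothL (initDict keys ([] : List Int))
  let clg := keys.foldl (fun d i => d.insert i (psOfList (cparts.getD i []))) PySem.Dict.empty
  let st := keys.foldl stepB (mlg, List.replicate n.toNat false, ([] : List (List Int)))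
  let clg2 := cl.foldl (propStep st.1) clg
  finalize st.1 clg2 st.2.2

-- ===== PRECONDITION & SPEC =====
-- union-find style must-link classes (content only; used by Pre_ to name A's ValueError inputs)
def mlClasses (ml : List (Int × Int)) : List (List Int) :=
  ml.foldl (fun cs p =>
    let touched := (cs.filter (fun c => c.contains p.1 || c.contains p.2)).flatten
    cs.filter (fun c => !(c.contains p.1 || c.contains p.2)) ++
      [PySem.Set.add (PySem.Set.add (PySem.Set.ofList touched) p.1) p.2]) []

-- Pre_ excludes exactly where Python A raises: a KeyError/IndexError endpoint outside range(n), or a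
-- ValueError from a cannot-link pair lying inside a must-link class of size ≥ 2 (inconsistent constraints).
def Pre_preprocess_constraints (ml : List (Int × Int)) (cl : List (Int × Int)) (n : Int) : Prop :=
  (∀ p ∈ ml, 0 ≤ p.1 ∧ p.1 < n ∧ 0 ≤ p.2 ∧ p.2 < n) ∧
  (∀ p ∈ cl, 0 ≤ p.1 ∧ p.1 < n ∧ 0 ≤ p.2 ∧ p.2 < n) ∧
  (∀ p ∈ cl, ¬ ∃ c ∈ mlClasses ml, p.1 ∈ c ∧ p.2 ∈ c ∧ ∃ d ∈ c, d ≠ p.1)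
instance (ml : List (Int × Int)) (cl : List (Int × Int)) (n : Int) : Decidable (Pre_preprocess_constraints ml cl n) := by unfold Pre_preprocess_constraints; infer_instance

def pvWitness_preprocess_constraints : (List (Int × Int)) × (List (Int × Int)) × Int :=
  ([(0, 1), (1, 2)], [(0, 3)], 4)

def Spec_preprocess_constraints (ml : List (Int × Int)) (cl : List (Int × Int)) (n : Int) (out : (List (Int × List Int)) × (List (Int × List Int)) × List (List Int)) : Prop := out = preprocess_constraints_alt ml cl n
instance (ml : List (Int × Int)) (cl : List (Int × Int)) (n : Int) (out : (List (Int × List Int)) × (List (Int × List Int)) × List (List Int)) : Decidable (Spec_preprocess_constraints ml cl n out) := by unfold Spec_preprocess_constraints; infer_instance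

-- ===== CLAIM (what is proved, stated in full; the proofs are below) =====
def Claim_equal_preprocess_constraints : Prop := ∀ (ml : List (Int × Int)) (cl : List (Int × Int)) (n : Int), Dom_preprocess_constraints ml cl n → Pre_preprocess_constraints ml cl n → Spec_preprocess_constraints ml cl n (preprocess_constraints ml cl n)

-- ===== LEMMAS AND PROOFS =====

theorem dfs_len (g : PySem.Dict Int PySet) :
    ∀ f, (∀ i vis comp, (dfsA g f i vis comp).1.length = vis.length) ∧
         (∀ js vis comp, (dfsLA g f js vis comp).1.length = vis.length) := by
  intro f
  induction f with
  | zero =>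
    refine ⟨fun i vis comp => by simp [dfsA], ?_⟩
    intro js
    induction js with
    | nil => intro vis comp; simp [dfsLA]
    | cons j js ih =>
      intro vis comp
      by_cases hv : PySem.List.pyGetD vis j true
      · simp [dfsLA, hv, ih]
      · simp [dfsLA, hv, ih, dfsA]
  | succ f ih =>
    have hA : ∀ i vis comp, (dfsA g (f+1) i vis comp).1.length = vis.length := by
      intro i vis comp
      simp [dfsA, ih.2, PySem.List.length_pySetD]
    refine ⟨hA, ?_⟩
    intro js
    induction js with
    | nil => intro vis comp; simp [dfsLA]
    | cons j js ihl =>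
      intro vis comp
      by_cases hv : PySem.List.pyGetD vis j true
      · simp [dfsLA, hv, ihl]
      · simp [dfsLA, hv, ihl, hA]


theorem aux_countP_set_le (vis : List Bool) (k : Nat) :
    (vis.set k true).countP (fun b => !b) ≤ vis.countP (fun b => !b) := by
  induction vis generalizing k with
  | nil => simp
  | cons b t ih =>
    cases k with
    | zero => cases b <;> simp
    | succ k => simp [List.countP_cons]; have := ih k; omega

theorem countP_false_pySetD_le (vis : List Bool) (j : Int) :
    (PySem.List.pySetD vis j true).countP (fun b => !b) ≤ vis.countP (fun b => !b) := by
  simp only [PySem.List.pySetD, PySem.List.pySet?]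
  rcases hi : PySem.List.pyIdx? vis.length j with _ | k
  · simp
  · simp only [Option.map_some, Option.getD_some]
    exact aux_countP_set_le vis k

theorem dfs_countP (g : PySem.Dict Int PySet) :
    ∀ f, (∀ i vis comp, ((dfsA g f i vis comp).1).countP (fun b => !b) ≤ vis.countP (fun b => !b)) ∧
         (∀ js vis comp, ((dfsLA g f js vis comp).1).countP (fun b => !b) ≤ vis.countP (fun b => !b)) := by
  intro f
  induction f with
  | zero =>
    refine ⟨fun i vis comp => by simp [dfsA], ?_⟩
    intro js
    induction js with
    | nil => intro vis comp; simp [dfsLA]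
    | cons j js ih =>
      intro vis comp
      by_cases hv : PySem.List.pyGetD vis j true
      · simp [dfsLA, hv, ih]
      · simp only [dfsLA, hv]
        simp only [Bool.false_eq_true, if_false, dfsA]
        exact ih _ _
  | succ f ih =>
    have hA : ∀ i vis comp, ((dfsA g (f+1) i vis comp).1).countP (fun b => !b) ≤ vis.countP (fun b => !b) := by
      intro i vis comp
      simp only [dfsA]
      exact le_trans (ih.2 _ _ _) (countP_false_pySetD_le vis i)
    refine ⟨hA, ?_⟩
    intro js
    induction js with
    | nil => intro vis comp; simp [dfsLA]
    | cons j js ihl =>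
      intro vis comp
      by_cases hv : PySem.List.pyGetD vis j true
      · simp [dfsLA, hv, ihl]
      · simp only [dfsLA, hv, Bool.false_eq_true, if_false]
        exact le_trans (ihl _ _) (hA _ _ _)

theorem BR (g : PySem.Dict Int PySet) :
    ∀ N (vis : List Bool), vis.countP (fun b => !b) = N →
      ∀ (js : List Int) (i : Int) (S : List (Int × List Int)) (comp : List Int) (f : Nat),
        vis.countP (fun b => !b) ≤ f →
        runB g ((i, js) :: S) vis comp =
          runB g S (dfsLA g f js vis comp).1 ((dfsLA g f js vis comp).2 ++ [i]) := by
  intro N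
  induction N using Nat.strong_induction_on with
  | _ N IH =>
    intro vis hN js
    induction js with
    | nil => intro i S comp f hf; simp [runB, dfsLA]
    | cons j js ihjs =>
      intro i S comp f hf
      by_cases hv : PySem.List.pyGetD vis j true
      · rw [show runB g ((i, j :: js) :: S) vis comp = runB g ((i, js) :: S) vis comp by
            simp [runB, hv]]
        rw [ihjs i S comp f hf]
        simp [dfsLA, hv]
      · have hv' : PySem.List.pyGetD vis j true = false := by simpa using hv
        have hlt := countP_false_pySetD_lt vis j hv'
        set vis' := PySem.List.pySetD vis j true with hvis'
        have hpos : 1 ≤ vis.countP (fun b => !b) := by omega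
        rcases f with _ | f'
        · omega
        · have step1 : runB g ((i, j :: js) :: S) vis comp =
              runB g ((j, (g.getD j psEmpty).toList) :: (i, js) :: S) vis' comp := by
            simp [runB, hv', ← hvis']
          have h1 : vis'.countP (fun b => !b) ≤ f' := by omega
          have ih1 := IH (vis'.countP (fun b => !b)) (by omega) vis' rfl
            ((g.getD j psEmpty).toList) j ((i, js) :: S) comp f' h1
          set q := dfsLA g f' ((g.getD j psEmpty).toList) vis' comp with hq
          have h2 : (q.1).countP (fun b => !b) ≤ vis'.countP (fun b => !b) :=
            (dfs_countP g f').2 _ _ _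
          have ih2 := IH ((q.1).countP (fun b => !b)) (by omega) q.1 rfl
            js i S (q.2 ++ [j]) (f'+1) (by omega)
          rw [step1, ih1, ih2]
          have hrA : dfsA g (f'+1) j vis comp = (q.1, q.2 ++ [j]) := by
            simp [dfsA, ← hvis', ← hq]
          rw [show dfsLA g (f'+1) (j :: js) vis comp = dfsLA g (f'+1) js q.1 (q.2 ++ [j]) by
            simp [dfsLA, hv', hrA]]

def inValues (g : PySem.Dict Int PySet) (x : Int) : Prop := ∃ kv ∈ g.items, x ∈ kv.2.toList

theorem psEmpty_toList : psEmpty.toList = [] := by decide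

theorem inValues_of_mem_getD (g : PySem.Dict Int PySet) (k x : Int)
    (h : x ∈ (g.getD k psEmpty).toList) : inValues g x := by
  rcases hk : g.get? k with _ | v
  · rw [PySem.Dict.getD_eq_get?_getD, hk] at h
    simp [psEmpty_toList] at h
  · rw [PySem.Dict.getD_eq_get?_getD, hk] at h
    exact ⟨(k, v), PySem.Dict.mem_items_of_get?_eq_some g hk, h⟩

theorem dfs_comp (g : PySem.Dict Int PySet) :
    ∀ f, (∀ i vis comp, ∀ x ∈ (dfsA g f i vis comp).2, x ∈ comp ∨ x = i ∨ inValues g x) ∧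
         (∀ js vis comp, ∀ x ∈ (dfsLA g f js vis comp).2, x ∈ comp ∨ x ∈ js ∨ inValues g x) := by
  intro f
  induction f with
  | zero =>
    refine ⟨fun i vis comp x hx => by simp [dfsA] at hx; tauto, ?_⟩
    intro js
    induction js with
    | nil => intro vis comp x hx; simp [dfsLA] at hx; tauto
    | cons j js ih =>
      intro vis comp x hx
      by_cases hv : PySem.List.pyGetD vis j true
      · simp only [dfsLA, hv, if_true] at hx
        rcases ih vis comp x hx with h | h | h <;> simp_all
      · simp only [dfsLA, hv, Bool.false_eq_true, if_false, dfsA] at hx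
        rcases ih _ _ x hx with h | h | h
        · rcases List.mem_append.mp h with h | h
          · tauto
          · simp at h; subst h; right; left; simp
        · right; left; simp [h]
        · tauto
  | succ f ih =>
    have hA : ∀ i vis comp, ∀ x ∈ (dfsA g (f+1) i vis comp).2, x ∈ comp ∨ x = i ∨ inValues g x := by
      intro i vis comp x hx
      simp only [dfsA] at hx
      rcases List.mem_append.mp hx with h | h
      · rcases (ih.2 _ _ _ x h) with h | h | h
        · tauto
        · exact Or.inr (Or.inr (inValues_of_mem_getD g i x h))
        · tauto
      · simp at h; tauto
    refine ⟨hA, ?_⟩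
    intro js
    induction js with
    | nil => intro vis comp x hx; simp [dfsLA] at hx; tauto
    | cons j js ihl =>
      intro vis comp x hx
      by_cases hv : PySem.List.pyGetD vis j true
      · simp only [dfsLA, hv, if_true] at hx
        rcases ihl vis comp x hx with h | h | h <;> simp_all
      · simp only [dfsLA, hv, Bool.false_eq_true, if_false] at hx
        rcases ihl _ _ x hx with h | h | h
        · rcases hA j vis comp x h with h | h | h
          · tauto
          · right; left; simp [h]
          · tauto
        · right; left; simp [h]
        · tauto

theorem modify_modify_self (d : PySem.Dict Int PySet) (k : Int) (z : PySet) (f h : PySet → PySet) :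
    (d.modify k z f).modify k z h = d.modify k z (fun v => h (f v)) := by
  show ((d.insert k (f (d.getD k z)))).insert k (h ((d.insert k (f (d.getD k z))).getD k z)) = _
  rw [PySem.Dict.getD_insert_self, PySem.Dict.insert_insert_self]
  rfl

theorem insert_getD_self (d : PySem.Dict Int PySet) (k : Int) (z : PySet)
    (hc : d.contains k = true) (hnd : d.keys.Nodup) :
    d.insert k (d.getD k z) = d := by
  apply PySem.Dict.ext
  rw [PySem.Dict.items_insert_of_contains d _ hc]
  apply List.map_congr_left ?_ |>.trans (List.map_id _)
  intro p hp
  by_cases hk : p.1 = k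
  · have : d.getD k z = p.2 := by
      have := PySem.Dict.getD_of_mem_items d (k := p.1) (v := p.2) (by simpa using hp) hnd z
      rw [← hk]; exact this
    subst hk
    simp only [BEq.rfl, if_true, id]
    rw [this]
  · simp [hk, id]

theorem modify_id_self (d : PySem.Dict Int PySet) (k : Int) (z : PySet)
    (hc : d.contains k = true) (hnd : d.keys.Nodup) :
    d.modify k z (fun v => v) = d := insert_getD_self d k z hc hnd

-- A's inner completion loop over x2 collapses to one in-place modify with a filtered fold
theorem inner_collapse (l : List Int) (k : Int) (g : PySem.Dict Int PySet)
    (hc : g.contains k = true) (hnd : g.keys.Nodup) :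
    l.foldl (fun g x2 => if k ≠ x2 then g.modify k psEmpty (fun s => psAdd s x2) else g) g =
      g.modify k psEmpty (fun s => (l.filter (fun y => y != k)).foldl psAdd s) := by
  induction l generalizing g with
  | nil => simp [List.foldl]; exact (modify_id_self g k psEmpty hc hnd).symm
  | cons y l ih =>
    by_cases hy : k = y
    · subst hy
      simp only [List.foldl, ne_eq, not_true_eq_false, if_false, List.filter]
      simpa using ih g hc hnd
    · have hy' : (y != k) = true := by simp [bne]; exact fun h => hy h.symm
      simp only [List.foldl, ne_eq, hy, not_false_eq_true, if_true, List.filter, hy']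
      rw [ih _ ?hc ?hnd, modify_modify_self]
      case hc => rw [PySem.Dict.contains_modify]; simp [hc]
      case hnd =>
        have : (g.modify k psEmpty (fun s => psAdd s y)).keys = (g.insert k _).keys :=
          PySem.Dict.keys_modify ..
        rw [this, PySem.Dict.keys_insert_of_contains _ _ hc]
        exact hnd

theorem modify_keeps (g : PySem.Dict Int PySet) (x : Int) (F : PySet → PySet)
    (hcx : g.contains x = true) :
    (g.modify x psEmpty F).keys = g.keys := by
  rw [PySem.Dict.keys_modify, PySem.Dict.keys_insert_of_contains _ _ hcx]

theorem complete_eq_aux (comp : List Int) (l : List Int) :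
    ∀ (g : PySem.Dict Int PySet), (∀ x ∈ comp, g.contains x = true) → g.keys.Nodup →
      (∀ x ∈ l, x ∈ comp) →
      l.foldl (fun g x1 =>
        comp.foldl (fun g x2 => if x1 ≠ x2 then g.modify x1 psEmpty (fun s => psAdd s x2) else g) g) g =
      l.foldl (fun g x => g.modify x psEmpty (fun s => (comp.filter (fun y => y != x)).foldl psAdd s)) g := by
  induction l with
  | nil => intro g _ _ _; rfl
  | cons x l ih =>
    intro g hc hnd hl
    have hcx : g.contains x = true := hc x (hl x (by simp))
    simp only [List.foldl]
    rw [inner_collapse comp x g hcx hnd]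
    set g1 := g.modify x psEmpty (fun s => (comp.filter (fun y => y != x)).foldl psAdd s) with hg1
    have hkeys : g1.keys = g.keys := modify_keeps g x _ hcx
    refine ih g1 ?_ ?_ (fun y hy => hl y (by simp [hy]))
    · intro y hy
      rw [hg1, PySem.Dict.contains_modify]
      simp [hc y hy]
    · rw [hkeys]; exact hnd

theorem complete_eq (g : PySem.Dict Int PySet) (comp : List Int)
    (hc : ∀ x ∈ comp, g.contains x = true) (hnd : g.keys.Nodup) :
    completeA g comp = completeB g comp :=
  complete_eq_aux comp comp g hc hnd (fun _ h => h)

-- ===== set-content subset lemmas =====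
theorem mem_filterMap_set (tbl : List (Option Int)) (slot : Nat) (v x : Int)
    (h : x ∈ (tbl.set slot (some v)).filterMap id) : x = v ∨ x ∈ tbl.filterMap id := by
  rcases List.mem_filterMap.mp h with ⟨a, ha, hax⟩
  rcases List.mem_or_eq_of_mem_set ha with h' | h'
  · exact Or.inr (List.mem_filterMap.mpr ⟨a, h', hax⟩)
  · subst h'; simp [id] at hax; tauto

theorem mem_psRawInsert (tbl : List (Option Int)) (v x : Int)
    (h : x ∈ (psRawInsert tbl v).filterMap id) : x = v ∨ x ∈ tbl.filterMap id := by
  unfold psRawInsert at h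
  rcases hm : psLoop tbl (tbl.length - 1) v (tbl.length + 70) (v.toNat &&& (tbl.length - 1)) v.toNat with _ | slot
  · rw [hm] at h; tauto
  · rw [hm] at h; exact mem_filterMap_set tbl slot v x h

theorem mem_foldl_psRawInsert (l : List Int) :
    ∀ (tbl : List (Option Int)) (x : Int), x ∈ (l.foldl psRawInsert tbl).filterMap id →
      x ∈ l ∨ x ∈ tbl.filterMap id := by
  induction l with
  | nil => intro tbl x h; tauto
  | cons v l ih =>
    intro tbl x h
    rcases ih _ x h with h' | h'
    · exact Or.inl (by simp [h'])
    · rcases mem_psRawInsert tbl v x h' with h'' | h''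
      · exact Or.inl (by simp [h''])
      · tauto

theorem mem_psAdd (s : PySet) (v x : Int) (h : x ∈ (psAdd s v).toList) :
    x = v ∨ x ∈ s.toList := by
  unfold psAdd at h
  rcases hm : psLoop s.table (s.table.length - 1) v (s.table.length + 70) (v.toNat &&& (s.table.length - 1)) v.toNat with _ | slot
  · rw [hm] at h; right; exact h
  · rw [hm] at h
    simp only [PySet.toList] at *
    split at h
    · unfold psResize at h
      simp only at h
      rcases mem_foldl_psRawInsert _ _ x (by simpa using h) with h' | h'
      · exact mem_filterMap_set s.table slot v x h'
      · simp at h'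
    · exact mem_filterMap_set s.table slot v x h

theorem mem_foldl_psAdd (l : List Int) :
    ∀ (s : PySet) (x : Int), x ∈ (l.foldl psAdd s).toList → x ∈ l ∨ x ∈ s.toList := by
  induction l with
  | nil => intro s x h; tauto
  | cons v l ih =>
    intro s x h
    rcases ih _ x h with h' | h'
    · exact Or.inl (by simp [h'])
    · rcases mem_psAdd s v x h' with h'' | h''
      · exact Or.inl (by simp [h''])
      · tauto

theorem mem_psOfList (l : List Int) (x : Int) (h : x ∈ (psOfList l).toList) : x ∈ l := by
  rcases mem_foldl_psAdd l psEmpty x h with h' | h'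
  · exact h'
  · simp [psEmpty_toList] at h'

theorem completeB_keys (comp : List Int) :
    ∀ (g : PySem.Dict Int PySet), (∀ x ∈ comp, g.contains x = true) →
      (completeB g comp).keys = g.keys := by
  unfold completeB
  suffices h : ∀ (l : List Int) (g : PySem.Dict Int PySet), (∀ x ∈ l, g.contains x = true) →
      (l.foldl (fun g x => g.modify x psEmpty (fun s => (comp.filter (fun y => y != x)).foldl psAdd s)) g).keys = g.keys by
    intro g hg; exact h comp g hg
  intro l
  induction l with
  | nil => intro g _; rfl
  | cons x l ih =>
    intro g hg
    simp only [List.foldl]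
    rw [ih _ ?_, modify_keeps _ _ _ (hg x (by simp))]
    intro y hy
    rw [PySem.Dict.contains_modify]
    simp [hg y (by simp [hy])]

theorem completeB_values (comp : List Int) (keysL : List Int) (hcomp : ∀ x ∈ comp, x ∈ keysL) :
    ∀ (g : PySem.Dict Int PySet),
      (∀ k x, x ∈ (g.getD k psEmpty).toList → x ∈ keysL) →
      (∀ k x, x ∈ ((completeB g comp).getD k psEmpty).toList → x ∈ keysL) := by
  unfold completeB
  suffices h : ∀ (l : List Int) (g : PySem.Dict Int PySet),
      (∀ k x, x ∈ (g.getD k psEmpty).toList → x ∈ keysL) →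
      (∀ k x, x ∈ ((l.foldl (fun g x => g.modify x psEmpty (fun s => (comp.filter (fun y => y != x)).foldl psAdd s)) g).getD k psEmpty).toList → x ∈ keysL) by
    intro g hg; exact h comp g hg
  intro l
  induction l with
  | nil => intro g hg; exact hg
  | cons x l ih =>
    intro g hg
    simp only [List.foldl]
    apply ih
    intro k y hy
    rw [PySem.Dict.getD_modify] at hy
    split at hy
    · rcases mem_foldl_psAdd _ _ y hy with h' | h'
      · exact hcomp y (List.mem_of_mem_filter h')
      · exact hg k y (by rename_i hk; rw [hk]; exact h')
    · exact hg k y hy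

-- one driver step: A and B agree and preserve the invariants
theorem step_eq (keysL : List Int) (N : Nat)
    (st : PySem.Dict Int PySet × List Bool × List (List Int)) (i : Int)
    (hkeys : st.1.keys = keysL) (hnd : keysL.Nodup)
    (hvals : ∀ k x, x ∈ (st.1.getD k psEmpty).toList → x ∈ keysL)
    (hlen : st.2.1.length = N) (hi : i ∈ keysL) :
    stepA (N+1) st i = stepB st i ∧
    ((stepA (N+1) st i).1.keys = keysL ∧
     (∀ k x, x ∈ ((stepA (N+1) st i).1.getD k psEmpty).toList → x ∈ keysL) ∧
     (stepA (N+1) st i).2.1.length = N) := by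
  obtain ⟨g, vis, nb⟩ := st
  simp only [stepA, stepB] at *
  by_cases hcond : (!(PySem.List.pyGetD vis i true) && !((g.getD i psEmpty).toList.isEmpty)) = true
  · simp only [hcond, if_true]
    set vis1 := PySem.List.pySetD vis i true with hvis1
    have hcount : vis1.countP (fun b => !b) ≤ N := by
      calc vis1.countP (fun b => !b) ≤ vis.countP (fun b => !b) := countP_false_pySetD_le vis i
        _ ≤ vis.length := List.countP_le_length
        _ = N := hlen
    have hbr := BR g (vis1.countP (fun b => !b)) vis1 rfl ((g.getD i psEmpty).toList) i [] [] N hcount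
    have hrun : runB g [(i, (g.getD i psEmpty).toList)] vis1 [] = dfsA g (N+1) i vis [] := by
      rw [hbr]
      simp [runB, dfsA, ← hvis1]
    set r := dfsA g (N+1) i vis [] with hr
    have hcomp : ∀ x ∈ r.2, x ∈ keysL := by
      intro x hx
      rcases (dfs_comp g (N+1)).1 i vis [] x hx with h | h | h
      · simp at h
      · subst h; exact hi
      · rcases h with ⟨kv, hkv, hxkv⟩
        have : g.getD kv.1 psEmpty = kv.2 := by
          refine PySem.Dict.getD_of_mem_items g ?_ (hkeys ▸ hnd) psEmpty
          exact (by simpa using hkv)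
        
        exact hvals kv.1 x (by rw [this]; exact hxkv)
    have hcontains : ∀ x ∈ r.2, g.contains x = true := by
      intro x hx
      rw [PySem.Dict.contains_iff_mem_keys, hkeys]
      exact hcomp x hx
    have hceq := complete_eq g r.2 hcontains (hkeys ▸ hnd)
    have hlen' : r.1.length = N := by rw [hr, (dfs_len g (N+1)).1 i vis []]; exact hlen
    refine ⟨?_, ?_, ?_, ?_⟩
    · rw [hrun, ← hceq]
    · rw [show (completeA g r.2).keys = g.keys from (hceq ▸ completeB_keys r.2 g hcontains)]
      exact hkeys
    · intro k x hx
      rw [hceq] at hx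
      exact completeB_values r.2 keysL hcomp g hvals k x hx
    · simpa using hlen'
  · simp only [hcond, Bool.false_eq_true, if_false]
    exact ⟨trivial, hkeys, hvals, hlen⟩

theorem driver_eq (keysL : List Int) (N : Nat) :
    ∀ (ks : List Int) (st : PySem.Dict Int PySet × List Bool × List (List Int)),
      st.1.keys = keysL → keysL.Nodup →
      (∀ k x, x ∈ (st.1.getD k psEmpty).toList → x ∈ keysL) →
      st.2.1.length = N → (∀ i ∈ ks, i ∈ keysL) →
      ks.foldl (stepA (N+1)) st = ks.foldl stepB st := by
  intro ks
  induction ks with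
  | nil => intro st _ _ _ _ _; rfl
  | cons i ks ih =>
    intro st hkeys hnd hvals hlen hks
    obtain ⟨heq, hk', hv', hl'⟩ := step_eq keysL N st i hkeys hnd hvals hlen (hks i (by simp))
    simp only [List.foldl]
    rw [← heq]
    exact ih _ hk' hnd hv' hl' (fun j hj => hks j (by simp [hj]))

-- ===== construction: edge fold of dict mutations = per-node partner index =====
theorem modify_keeps' {V : Type} (g : PySem.Dict Int V) (x : Int) (z : V) (F : V → V)
    (hcx : g.contains x = true) : (g.modify x z F).keys = g.keys := by
  rw [PySem.Dict.keys_modify, PySem.Dict.keys_insert_of_contains _ _ hcx]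

theorem getD_mod2_fold {V : Type} (F G : Int → V → V) (z : V) :
    ∀ (ml : List (Int × Int)) (d : PySem.Dict Int V) (k : Int),
      (ml.foldl (fun d p => (d.modify p.1 z (F p.2)).modify p.2 z (G p.1)) d).getD k z =
      ml.foldl (fun v p => (if k = p.2 then G p.1 else id) ((if k = p.1 then F p.2 else id) v)) (d.getD k z) := by
  intro ml
  induction ml with
  | nil => intro d k; rfl
  | cons p ml ih =>
    intro d k
    simp only [List.foldl]
    rw [ih]
    congr 1
    rw [PySem.Dict.getD_modify, PySem.Dict.getD_modify]
    by_cases h2 : k = p.2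
    · subst h2
      by_cases h1 : p.2 = p.1 <;> simp [h1]
    · by_cases h1 : k = p.1
      · subst h1
        simp [h2]
      · simp [h2]
        rw [PySem.Dict.getD_modify]
        simp [h1]

theorem keys_mod2_fold {V : Type} (z : V) :
    ∀ (ml : List (Int × Int)) (d : PySem.Dict Int V) (F G : Int → V → V),
      (∀ p ∈ ml, p.1 ∈ d.keys ∧ p.2 ∈ d.keys) →
      (ml.foldl (fun d p => (d.modify p.1 z (F p.2)).modify p.2 z (G p.1)) d).keys = d.keys := by
  intro ml
  induction ml with
  | nil => intro d F G _; rfl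
  | cons p ml ih =>
    intro d F G h
    simp only [List.foldl]
    have h1 : d.contains p.1 = true := (PySem.Dict.contains_iff_mem_keys d p.1).mpr (h p (by simp)).1
    have hk1 : (d.modify p.1 z (F p.2)).keys = d.keys := modify_keeps' d p.1 z _ h1
    have h2 : (d.modify p.1 z (F p.2)).contains p.2 = true := by
      rw [PySem.Dict.contains_iff_mem_keys, hk1]; exact (h p (by simp)).2
    have hk2 := modify_keeps' (d.modify p.1 z (F p.2)) p.2 z (G p.1) h2
    rw [ih _ F G ?_, hk2, hk1]
    intro q hq
    rw [hk2, hk1]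
    exact h q (by simp [hq])

theorem psOfList_append (l : List Int) (x : Int) :
    psOfList (l ++ [x]) = psAdd (psOfList l) x := by
  simp [psOfList, List.foldl_append]

theorem if_add_comm (c : Prop) [Decidable c] (x : Int) (l : List Int) :
    (if c then (fun s => psAdd s x) else id) (psOfList l) =
      psOfList ((if c then (fun w => w ++ [x]) else id) l) := by
  split_ifs
  · exact (psOfList_append l x).symm
  · rfl

theorem fold_add_eq_ofList (k : Int) :
    ∀ (ml : List (Int × Int)) (l : List Int),
      ml.foldl (fun v p => (if k = p.2 then (fun s => psAdd s p.1) else id)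
          ((if k = p.1 then (fun s => psAdd s p.2) else id) v)) (psOfList l) =
      psOfList (ml.foldl (fun v p => (if k = p.2 then (fun w => w ++ [p.1]) else id)
          ((if k = p.1 then (fun w => w ++ [p.2]) else id) v)) l) := by
  intro ml
  induction ml with
  | nil => intro l; rfl
  | cons p ml ih =>
    intro l
    simp only [List.foldl]
    rw [if_add_comm, if_add_comm, ih]

theorem items_initDict {V : Type} (keysL : List Int) (c : V) (hnd : keysL.Nodup) :
    (initDict keysL c).items = keysL.map (fun k => (k, c)) := by
  unfold initDict
  have := PySem.Dict.items_foldl_insert_fresh (ν := V) keysL (fun a => a) (fun _ => c)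
    PySem.Dict.empty (fun a _ => by simp [PySem.Dict.contains_empty]) (by simpa using hnd)
  simpa using this

theorem keys_initDict {V : Type} (keysL : List Int) (c : V) (hnd : keysL.Nodup) :
    (initDict keysL c).keys = keysL := by
  unfold PySem.Dict.keys
  rw [items_initDict keysL c hnd]
  rw [List.map_map]
  have : ((fun (x : Int × V) => x.1) ∘ fun k => (k, c)) = fun k => k := rfl
  rw [this]; exact List.map_id' keysL

theorem getD_initDict {V : Type} (keysL : List Int) (c : V) (hnd : keysL.Nodup) (k : Int) (z : V) :
    (initDict keysL c).getD k z = if k ∈ keysL then c else z := by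
  by_cases hk : k ∈ keysL
  · rw [if_pos hk]
    refine PySem.Dict.getD_of_mem_items _ ?_ ?_ z
    · rw [items_initDict keysL c hnd]
      exact List.mem_map.mpr ⟨k, hk, rfl⟩
    · rw [keys_initDict keysL c hnd]; exact hnd
  · rw [if_neg hk]
    refine PySem.Dict.getD_of_not_contains _ z ?_
    rw [← Bool.not_eq_true, PySem.Dict.contains_iff_mem_keys, keys_initDict keysL c hnd]
    exact hk

-- the per-node partner sequence of an edge list
def phiL (k : Int) (ml : List (Int × Int)) : List Int :=
  ml.foldl (fun v p => (if k = p.2 then (fun w => w ++ [p.1]) else id)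
    ((if k = p.1 then (fun w => w ++ [p.2]) else id) v)) []

theorem mem_phiL_aux (k : Int) :
    ∀ (ml : List (Int × Int)) (l : List Int) (x : Int),
      x ∈ ml.foldl (fun v p => (if k = p.2 then (fun w => w ++ [p.1]) else id)
        ((if k = p.1 then (fun w => w ++ [p.2]) else id) v)) l →
      x ∈ l ∨ ∃ p ∈ ml, x = p.1 ∨ x = p.2 := by
  intro ml
  induction ml with
  | nil => intro l x h; tauto
  | cons p ml ih =>
    intro l x h
    rcases ih _ x h with h' | h'
    · dsimp only at h'
      split_ifs at h' with ha hb hb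
      · rcases List.mem_append.mp h' with h'' | h''
        · rcases List.mem_append.mp h'' with h3 | h3
          · tauto
          · simp at h3; right; exact ⟨p, by simp, Or.inr h3⟩
        · simp at h''; right; exact ⟨p, by simp, Or.inl h''⟩
      · rcases List.mem_append.mp h' with h'' | h''
        · tauto
        · simp at h''; right; exact ⟨p, by simp, Or.inl h''⟩
      · simp only [id] at h'
        rcases List.mem_append.mp h' with h'' | h''
        · tauto
        · simp at h''; right; exact ⟨p, by simp, Or.inr h''⟩
      · simp only [id] at h'; tauto
    · rcases h' with ⟨q, hq, hx⟩
      exact Or.inr ⟨q, by simp [hq], hx⟩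

-- the dict of sets built by A's edge fold equals B's per-node construction
theorem build_eq (keysL : List Int) (hnd : keysL.Nodup) (pl : List (Int × Int))
    (hend : ∀ p ∈ pl, p.1 ∈ keysL ∧ p.2 ∈ keysL) :
    pl.foldl addBoth2 (initDict keysL psEmpty) =
      keysL.foldl (fun d i => d.insert i
        (psOfList ((pl.foldl addBothL (initDict keysL ([] : List Int))).getD i []))) PySem.Dict.empty := by
  have hparts : ∀ k, (pl.foldl addBothL (initDict keysL ([] : List Int))).getD k [] = phiL k pl := by
    intro k
    unfold addBothL phiL
    rw [getD_mod2_fold (fun w => (· ++ [w])) (fun w => (· ++ [w])) ([] : List Int) pl _ k]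
    rw [getD_initDict keysL _ hnd k]
    split_ifs <;> rfl
  have hkeysA : (pl.foldl addBoth2 (initDict keysL psEmpty)).keys = keysL := by
    unfold addBoth2
    rw [keys_mod2_fold psEmpty pl _ (fun w => fun s => psAdd s w) (fun w => fun s => psAdd s w) ?_]
    · exact keys_initDict keysL psEmpty hnd
    · intro p hp
      rw [keys_initDict keysL psEmpty hnd]
      exact hend p hp
  have hvalA : ∀ k, k ∈ keysL → (pl.foldl addBoth2 (initDict keysL psEmpty)).getD k psEmpty =
      psOfList (phiL k pl) := by
    intro k hk
    unfold addBoth2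
    rw [getD_mod2_fold (fun w => fun s => psAdd s w) (fun w => fun s => psAdd s w) psEmpty pl _ k]
    rw [getD_initDict keysL _ hnd k, if_pos hk]
    have : psEmpty = psOfList [] := rfl
    rw [this, fold_add_eq_ofList k pl []]
    rfl
  apply PySem.Dict.ext
  rw [PySem.Dict.items_eq_map_keys _ (by rw [hkeysA]; exact hnd) psEmpty, hkeysA]
  have hfresh := PySem.Dict.items_foldl_insert_fresh (ν := PySet) keysL (fun a => a)
    (fun i => psOfList ((pl.foldl addBothL (initDict keysL ([] : List Int))).getD i []))
    PySem.Dict.empty (fun a _ => by simp [PySem.Dict.contains_empty]) (by simpa using hnd)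
  rw [hfresh]
  simp only [show (PySem.Dict.empty : PySem.Dict Int PySet).items = [] from rfl, List.nil_append]
  apply List.map_congr_left
  intro k hk
  rw [hvalA k hk, hparts k]

theorem buildB_items (keysL : List Int) (hnd : keysL.Nodup) (V : Int → PySet) :
    (keysL.foldl (fun d i => d.insert i (V i)) PySem.Dict.empty).items =
      keysL.map (fun k => (k, V k)) := by
  have hfresh := PySem.Dict.items_foldl_insert_fresh (ν := PySet) keysL (fun a => a) V
    PySem.Dict.empty (fun a _ => by simp [PySem.Dict.contains_empty]) (by simpa using hnd)
  simpa using hfresh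

theorem buildB_keys (keysL : List Int) (hnd : keysL.Nodup) (V : Int → PySet) :
    (keysL.foldl (fun d i => d.insert i (V i)) PySem.Dict.empty).keys = keysL := by
  unfold PySem.Dict.keys
  rw [buildB_items keysL hnd V, List.map_map]
  have : ((fun (x : Int × PySet) => x.1) ∘ fun k => (k, V k)) = fun k => k := rfl
  rw [this]; exact List.map_id' keysL

theorem buildB_getD (keysL : List Int) (hnd : keysL.Nodup) (V : Int → PySet) (k : Int) :
    (keysL.foldl (fun d i => d.insert i (V i)) PySem.Dict.empty).getD k psEmpty =
      if k ∈ keysL then V k else psEmpty := by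
  by_cases hk : k ∈ keysL
  · rw [if_pos hk]
    refine PySem.Dict.getD_of_mem_items _ ?_ ?_ psEmpty
    · rw [buildB_items keysL hnd V]
      exact List.mem_map.mpr ⟨k, hk, rfl⟩
    · rw [buildB_keys keysL hnd V]; exact hnd
  · rw [if_neg hk]
    refine PySem.Dict.getD_of_not_contains _ psEmpty ?_
    rw [← Bool.not_eq_true, PySem.Dict.contains_iff_mem_keys, buildB_keys keysL hnd V]
    exact hk

theorem parts_getD (keysL : List Int) (hnd : keysL.Nodup) (pl : List (Int × Int)) (k : Int) :
    (pl.foldl addBothL (initDict keysL ([] : List Int))).getD k [] = phiL k pl := by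
  unfold addBothL phiL
  rw [getD_mod2_fold (fun w => (· ++ [w])) (fun w => (· ++ [w])) ([] : List Int) pl _ k]
  rw [getD_initDict keysL _ hnd k]
  split_ifs <;> rfl


-- ===== VERDICT (by name: the statement is the Claim_ definition above) =====
theorem preprocess_constraints_spec : Claim_equal_preprocess_constraints := by
  intro ml cl n _hdom hpre
  obtain ⟨hml, hcl, _hcons⟩ := hpre
  unfold Spec_preprocess_constraints
  simp only [preprocess_constraints, preprocess_constraints_alt]
  set keysL := PySem.List.pyRange 0 n 1 with hkeysL
  have hnd : keysL.Nodup := PySem.List.nodup_pyRange_one 0 n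
  have hmlk : ∀ p ∈ ml, p.1 ∈ keysL ∧ p.2 ∈ keysL := by
    intro p hp
    have := hml p hp
    constructor <;> rw [hkeysL, PySem.List.mem_pyRange_one] <;> omega
  have hclk : ∀ p ∈ cl, p.1 ∈ keysL ∧ p.2 ∈ keysL := by
    intro p hp
    have := hcl p hp
    constructor <;> rw [hkeysL, PySem.List.mem_pyRange_one] <;> omega
  rw [build_eq keysL hnd ml hmlk, build_eq keysL hnd cl hclk]
  rw [driver_eq keysL n.toNat keysL _ ?hk hnd ?hv ?hl (fun i hi => hi)]
  case hk => exact buildB_keys keysL hnd _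
  case hl => simp
  case hv =>
    intro k x hx
    rw [buildB_getD keysL hnd _ k] at hx
    split_ifs at hx with hkmem
    · have hx' := mem_psOfList _ x hx
      rw [parts_getD keysL hnd ml k] at hx'
      rcases mem_phiL_aux k ml [] x hx' with h | ⟨p, hp, hxp⟩
      · simp at h
      · rcases hxp with h | h
        · subst h; exact (hmlk p hp).1
        · subst h; exact (hmlk p hp).2
    · simp [psEmpty_toList] at hx
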